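-- pv_equiv track=rewrite | github.com/narenrameshb/music-from-math | audio_engine.py | create_rhythm_pattern
-- ===== SOURCE A (Python) =====
-- def create_rhythm_pattern(pattern_type='simple', num_notes=8):
--     """
--     Create a rhythm pattern for the melody.
--
--     Args:
--         pattern_type (str): Type of rhythm pattern
--         num_notes (int): Number of notes in the pattern
--
--     Returns:
--         list: List of note durations in milliseconds
--     """
--     if pattern_type == 'simple':
--         # Simple pattern: all notes equal duration
--         return [500] * num_notes
--     elif pattern_type == 'waltz':
--         # Waltz pattern: 3/4 time
--         pattern = []
--         for i in range(num_notes):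
--             if i % 3 == 0:
--                 pattern.append(800)  # Strong beat
--             else:
--                 pattern.append(400)  # Weak beat
--         return pattern[:num_notes]
--     elif pattern_type == 'march':
--         # March pattern: 4/4 time
--         pattern = []
--         for i in range(num_notes):
--             if i % 4 == 0:
--                 pattern.append(600)  # Strong beat
--             elif i % 2 == 0:
--                 pattern.append(400)  # Medium beat
--             else:
--                 pattern.append(200)  # Weak beat
--         return pattern[:num_notes]
--     else:
--         return [500] * num_notes
-- ===== SOURCE B (Python) =====
-- _BASES = {
--     'simple': [500],
--     'waltz': [800, 400, 400],
--     'march': [600, 200, 400, 200],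
-- }
--
-- def create_rhythm_pattern(pattern_type='simple', num_notes=8):
--     base = _BASES.get(pattern_type, [500])
--     return [base[i % len(base)] for i in range(num_notes)]
-- ===== Notes on version B (the rewrite author's own statement) =====
-- stated objective: idiomatic
-- what changed: Replaces the branch-per-pattern loops with i%3/i%4 conditionals by a table of cyclic base patterns (simple->[500], waltz->[800,400,400], march->[600,200,400,200], default [500]) cycled over the index range in one comprehension.
import Mathlib
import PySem

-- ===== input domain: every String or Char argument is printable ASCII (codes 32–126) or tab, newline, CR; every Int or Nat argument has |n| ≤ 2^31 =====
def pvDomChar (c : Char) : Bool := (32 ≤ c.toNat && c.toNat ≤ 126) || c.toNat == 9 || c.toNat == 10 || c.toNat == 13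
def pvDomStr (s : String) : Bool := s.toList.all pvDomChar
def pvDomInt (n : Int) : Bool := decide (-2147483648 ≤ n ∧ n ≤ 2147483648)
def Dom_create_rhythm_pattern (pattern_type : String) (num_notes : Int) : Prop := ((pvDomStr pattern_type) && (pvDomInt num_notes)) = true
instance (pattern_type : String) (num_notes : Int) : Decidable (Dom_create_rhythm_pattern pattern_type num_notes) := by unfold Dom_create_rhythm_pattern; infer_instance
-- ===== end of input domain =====

-- B replaces A's per-index branch logic by a table of cyclic base patterns indexed with i % len(base) (idiomatic, same cost).

-- ===== PORT A =====
def create_rhythm_pattern (pattern_type : String) (num_notes : Int) : List Int :=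
  if pattern_type == "simple" then
    List.replicate num_notes.toNat 500
  else if pattern_type == "waltz" then
    let pattern := (PySem.List.pyRange 0 num_notes 1).foldl
      (fun acc i => if PySem.Int.mod i 3 == 0 then acc ++ [800] else acc ++ [400]) []
    PySem.List.slice pattern none (some num_notes)
  else if pattern_type == "march" then
    let pattern := (PySem.List.pyRange 0 num_notes 1).foldl
      (fun acc i =>
        if PySem.Int.mod i 4 == 0 then acc ++ [600]
        else if PySem.Int.mod i 2 == 0 then acc ++ [400]
        else acc ++ [200]) []
    PySem.List.slice pattern none (some num_notes)
  else
    List.replicate num_notes.toNat 500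

-- ===== PORT B =====
def pvBases : PySem.Dict String (List Int) :=
  ((PySem.Dict.empty.insert "simple" [500]).insert "waltz" [800, 400, 400]).insert
    "march" [600, 200, 400, 200]

def create_rhythm_pattern_alt (pattern_type : String) (num_notes : Int) : List Int :=
  let base := PySem.Dict.getD pvBases pattern_type [500]
  -- base[i % len(base)]: 0 ≤ i % len < len, so the index is always in range; pyGetD's default is never used
  (PySem.List.pyRange 0 num_notes 1).map
    (fun i => PySem.List.pyGetD base (PySem.Int.mod i (base.length : Int)) 0)

-- ===== PRECONDITION & SPEC =====
def Spec_create_rhythm_pattern (pattern_type : String) (num_notes : Int) (out : List Int) : Prop := out = create_rhythm_pattern_alt pattern_type num_notes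
instance (pattern_type : String) (num_notes : Int) (out : List Int) : Decidable (Spec_create_rhythm_pattern pattern_type num_notes out) := by unfold Spec_create_rhythm_pattern; infer_instance

-- ===== CLAIM (what is proved, stated in full; the proofs are below) =====
def Claim_equal_create_rhythm_pattern : Prop := ∀ (pattern_type : String) (num_notes : Int), Dom_create_rhythm_pattern pattern_type num_notes → Spec_create_rhythm_pattern pattern_type num_notes (create_rhythm_pattern pattern_type num_notes)

-- ===== LEMMAS AND PROOFS =====

-- the constant cycle (base [500]): B's comprehension is a replicate
theorem alt_const (n : Int) :
    (PySem.List.pyRange 0 n 1).map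
      (fun i => PySem.List.pyGetD [(500 : Int)] (PySem.Int.mod i ((1 : Nat) : Int)) 0)
    = List.replicate n.toNat 500 := by
  rw [List.eq_replicate_iff]
  constructor
  · simp [PySem.List.length_pyRange_one]
  · intro b hb
    rcases List.mem_map.mp hb with ⟨i, hi, rfl⟩
    have h0 : PySem.Int.mod i 1 = 0 := by
      have h1 := PySem.Int.mod_nonneg i (b := 1) (by omega)
      have h2 := PySem.Int.mod_lt i (b := 1) (by omega)
      omega
    simp [PySem.List.pyGetD]

-- A's append loop is a map over the range
theorem foldl_ite_append (f g : Int → Int) (p : Int → Bool) (l acc : List Int) :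
    l.foldl (fun acc i => if p i then acc ++ [f i] else acc ++ [g i]) acc
    = acc ++ l.map (fun i => if p i then f i else g i) := by
  induction l generalizing acc with
  | nil => simp
  | cons x xs ih => by_cases h : p x <;> simp [h, ih]

theorem foldl_ite3_append (f g h : Int → Int) (p q : Int → Bool) (l acc : List Int) :
    l.foldl (fun acc i => if p i then acc ++ [f i] else if q i then acc ++ [g i] else acc ++ [h i]) acc
    = acc ++ l.map (fun i => if p i then f i else if q i then g i else h i) := by
  induction l generalizing acc with
  | nil => simp
  | cons x xs ih =>
      by_cases hp : p x
      · simp [hp, ih]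
      · by_cases hq : q x <;> simp [hp, hq, ih]

-- slicing the built pattern with [:num_notes] keeps it whole
theorem slice_map_range (f : Int → Int) (n : Int) :
    PySem.List.slice ((PySem.List.pyRange 0 n 1).map f) none (some n)
    = (PySem.List.pyRange 0 n 1).map f := by
  by_cases h : 0 ≤ n
  · rw [PySem.List.slice_to _ h]
    apply List.take_of_length_le
    simp [PySem.List.length_pyRange_one]
  · have : PySem.List.pyRange 0 n 1 = [] := by
      apply List.eq_nil_of_length_eq_zero
      rw [PySem.List.length_pyRange_one]; omega
    simp [this, PySem.List.slice]

theorem waltz_point (i : Int) (_hi : 0 ≤ i) :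
    (if PySem.Int.mod i 3 == 0 then (800 : Int) else 400)
    = PySem.List.pyGetD [(800 : Int), 400, 400] (PySem.Int.mod i ((3 : Nat) : Int)) 0 := by
  have h1 := PySem.Int.mod_nonneg i (b := 3) (by omega)
  have h2 := PySem.Int.mod_lt i (b := 3) (by omega)
  have : ((3 : Nat) : Int) = 3 := by norm_num
  rw [this]
  interval_cases h : PySem.Int.mod i 3 <;> simp [PySem.List.pyGetD]

theorem march_point (i : Int) (_hi : 0 ≤ i) :
    (if PySem.Int.mod i 4 == 0 then (600 : Int)
     else if PySem.Int.mod i 2 == 0 then 400 else 200)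
    = PySem.List.pyGetD [(600 : Int), 200, 400, 200] (PySem.Int.mod i ((4 : Nat) : Int)) 0 := by
  have h1 := PySem.Int.mod_nonneg i (b := 4) (by omega)
  have h2 := PySem.Int.mod_lt i (b := 4) (by omega)
  have hc : ((4 : Nat) : Int) = 4 := by norm_num
  rw [hc]
  have hrel : PySem.Int.mod i 2 = PySem.Int.mod (PySem.Int.mod i 4) 2 := by
    rw [PySem.Int.mod_eq_emod_of_pos (a := i) (by omega),
        PySem.Int.mod_eq_emod_of_pos (a := PySem.Int.mod i 4) (by omega),
        PySem.Int.mod_eq_emod_of_pos (a := i) (b := 4) (by omega)]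
    exact (Int.emod_emod_of_dvd i (by norm_num)).symm
  rw [hrel]
  interval_cases h : PySem.Int.mod i 4 <;> simp [PySem.List.pyGetD]

-- ===== VERDICT (by name: the statement is the Claim_ definition above) =====
theorem create_rhythm_pattern_spec : Claim_equal_create_rhythm_pattern := by
  intro pt n _
  show create_rhythm_pattern pt n = create_rhythm_pattern_alt pt n
  unfold create_rhythm_pattern create_rhythm_pattern_alt
  by_cases hs : pt == "simple"
  · have : PySem.Dict.getD pvBases pt [500] = [500] := by
      rw [show pt = "simple" from by simpa using hs]; decide
    simp only [hs, if_pos, this]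
    exact (alt_const n).symm
  · by_cases hw : pt == "waltz"
    · have hb : PySem.Dict.getD pvBases pt [500] = [800, 400, 400] := by
        rw [show pt = "waltz" from by simpa using hw]; decide
      simp only [hs, hw, if_pos, hb]
      rw [foldl_ite_append (fun _ => 800) (fun _ => 400)
            (fun i => PySem.Int.mod i 3 == 0), List.nil_append, slice_map_range]
      apply List.map_congr_left
      intro i hi
      have h0 : (0 : Int) ≤ i := (PySem.List.mem_pyRange_one.mp hi).1
      simpa using waltz_point i h0
    · by_cases hm : pt == "march"
      · have hb : PySem.Dict.getD pvBases pt [500] = [600, 200, 400, 200] := by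
          rw [show pt = "march" from by simpa using hm]; decide
        simp only [hs, hw, hm, if_pos, hb]
        rw [foldl_ite3_append (fun _ => 600) (fun _ => 400) (fun _ => 200)
              (fun i => PySem.Int.mod i 4 == 0) (fun i => PySem.Int.mod i 2 == 0),
            List.nil_append, slice_map_range]
        apply List.map_congr_left
        intro i hi
        have h0 : (0 : Int) ≤ i := (PySem.List.mem_pyRange_one.mp hi).1
        simpa using march_point i h0
      · have hb : PySem.Dict.getD pvBases pt [500] = [500] := by
          simp only [PySem.Dict.getD, pvBases]
          rw [PySem.Dict.get?_insert_of_ne _ _ (by simpa using hm),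
              PySem.Dict.get?_insert_of_ne _ _ (by simpa using hw),
              PySem.Dict.get?_insert_of_ne _ _ (by simpa using hs)]
          simp [PySem.Dict.empty, PySem.Dict.get?]
        simp only [hs, hw, hm, hb]
        exact (alt_const n).symm
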